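-- pv_equiv track=rewrite | github.com/0d-fako/SemiColon-Assignment | PythonClass/classWorks/Feb-2025/corn_flakes.py | accept_mixed_case_string_and_move_upper_case_to_front
-- ===== SOURCE A (Python) =====
-- def accept_mixed_case_string_and_move_upper_case_to_front(mixed_cases_string:str)->str:
--     new_string = ""
--     upper_case_chars = ""
--     lower_case_chars = ""
--     for character in mixed_cases_string:
--         if character.isupper():
--             upper_case_chars += character
--         else:
--             lower_case_chars += character
--
--     new_string = upper_case_chars + lower_case_chars
--     return new_string
-- ===== SOURCE B (Python) =====
-- def accept_mixed_case_string_and_move_upper_case_to_front(mixed_cases_string: str) -> str: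
--     return "".join(sorted(mixed_cases_string, key=lambda c: not c.isupper()))
-- ===== Notes on version B (the rewrite author's own statement) =====
-- stated objective: idiomatic
-- what changed: Replaces the two-accumulator partition loop with a single stable sort keyed on a per-character boolean (lowercase sorts after uppercase), relying on sort stability to preserve each group's order.
import Mathlib
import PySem

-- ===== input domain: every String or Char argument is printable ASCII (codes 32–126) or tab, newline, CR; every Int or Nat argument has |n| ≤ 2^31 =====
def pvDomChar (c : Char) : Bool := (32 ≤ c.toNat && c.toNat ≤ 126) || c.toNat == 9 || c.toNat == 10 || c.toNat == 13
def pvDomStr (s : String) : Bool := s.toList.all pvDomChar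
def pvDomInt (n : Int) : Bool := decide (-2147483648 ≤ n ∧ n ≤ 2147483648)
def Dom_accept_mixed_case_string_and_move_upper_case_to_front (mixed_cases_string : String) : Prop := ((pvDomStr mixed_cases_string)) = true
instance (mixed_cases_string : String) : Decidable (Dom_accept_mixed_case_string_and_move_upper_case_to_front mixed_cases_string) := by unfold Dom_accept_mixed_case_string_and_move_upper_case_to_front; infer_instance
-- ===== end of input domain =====

-- B replaces A's two-accumulator partition loop with one stable sort keyed on `not c.isupper()` (idiomatic; not faster).

-- ===== PORT A =====
-- A: one pass, appending each char to an upper or a lower accumulator, then concatenating.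
def accept_mixed_case_string_and_move_upper_case_to_front (mixed_cases_string : String) : String :=
  let p := mixed_cases_string.toList.foldl
    (fun (acc : List Char × List Char) character =>
      if PySem.Chars.isupper character then (acc.1 ++ [character], acc.2)
      else (acc.1, acc.2 ++ [character]))
    ([], [])
  String.mk (p.1 ++ p.2)

-- ===== PORT B =====
-- B: "".join(sorted(mixed_cases_string, key=lambda c: not c.isupper()))
def accept_mixed_case_string_and_move_upper_case_to_front_alt (mixed_cases_string : String) : String :=
  String.mk (PySem.List.sorted mixed_cases_string.toList (fun c => !(PySem.Chars.isupper c)) false)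

-- ===== PRECONDITION & SPEC =====
def Spec_accept_mixed_case_string_and_move_upper_case_to_front (mixed_cases_string : String) (out : String) : Prop := out = accept_mixed_case_string_and_move_upper_case_to_front_alt mixed_cases_string
instance (mixed_cases_string : String) (out : String) : Decidable (Spec_accept_mixed_case_string_and_move_upper_case_to_front mixed_cases_string out) := by unfold Spec_accept_mixed_case_string_and_move_upper_case_to_front; infer_instance

-- ===== CLAIM (what is proved, stated in full; the proofs are below) =====
def Claim_equal_accept_mixed_case_string_and_move_upper_case_to_front : Prop := ∀ (mixed_cases_string : String), Dom_accept_mixed_case_string_and_move_upper_case_to_front mixed_cases_string → Spec_accept_mixed_case_string_and_move_upper_case_to_front mixed_cases_string (accept_mixed_case_string_and_move_upper_case_to_front mixed_cases_string)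

-- ===== LEMMAS AND PROOFS =====

-- inserting x past a run of elements it never goes before appends it at the end
theorem insertBy_all_not {α : Type} (before : α → α → Bool) (x : α) (l : List α)
    (h : ∀ y ∈ l, before x y = false) :
    PySem.List.insertBy before x l = l ++ [x] := by
  induction l with
  | nil => simp [PySem.List.insertBy]
  | cons y ys ih =>
      simp [PySem.List.insertBy, h y (by simp)]
      exact ih (fun z hz => h z (by simp [hz]))

-- inserting into a false-block ++ true-block (w.r.t. a Bool key) keeps the two blocks, stably
theorem insertBy_partition {α : Type} (key : α → Bool) (x : α) (F T : List α)
    (hF : ∀ a ∈ F, key a = false) (hT : ∀ a ∈ T, key a = true) :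
    PySem.List.insertBy (fun a b => decide (key a < key b)) x (F ++ T) =
      if key x then F ++ T ++ [x] else F ++ x :: T := by
  induction F with
  | nil =>
      simp only [List.nil_append]
      cases T with
      | nil =>
          simp [PySem.List.insertBy]
      | cons t ts =>
          have ht : key t = true := hT t (by simp)
          cases hx : key x with
          | false =>
              simp [PySem.List.insertBy, ht, hx, Bool.lt_iff]
          | true =>
              have : ∀ y ∈ t :: ts, (fun a b => decide (key a < key b)) x y = false := by
                intro y hy
                simp [hx, hT y hy]
              rw [insertBy_all_not _ _ _ this]
              simp
  | cons f F' ih =>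
      have hf : key f = false := hF f (by simp)
      have step : PySem.List.insertBy (fun a b => decide (key a < key b)) x ((f :: F') ++ T)
          = f :: PySem.List.insertBy (fun a b => decide (key a < key b)) x (F' ++ T) := by
        simp [PySem.List.insertBy, hf, Bool.lt_iff]
      rw [step, ih (fun a ha => hF a (by simp [ha]))]
      cases hx : key x <;> simp

-- the insertion-sort fold keeps the accumulator partitioned into false-keys ++ true-keys
theorem foldl_insertBy_partition {α : Type} (key : α → Bool) (xs F T : List α)
    (hF : ∀ a ∈ F, key a = false) (hT : ∀ a ∈ T, key a = true) :
    xs.foldl (fun acc x => PySem.List.insertBy (fun a b => decide (key a < key b)) x acc) (F ++ T)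
      = (F ++ xs.filter (fun c => !(key c))) ++ (T ++ xs.filter key) := by
  induction xs generalizing F T with
  | nil => simp
  | cons x xs ih =>
      simp only [List.foldl_cons]
      rw [insertBy_partition key x F T hF hT]
      cases hx : key x with
      | false =>
          rw [if_neg (by simp), List.append_cons,
            ih (F ++ [x]) T
            (by intro a ha; rcases List.mem_append.1 ha with h | h
                · exact hF a h
                · simp at h; subst h; exact hx) hT]
          simp [List.filter, hx]
      | true =>
          rw [if_pos rfl, List.append_assoc,
            ih F (T ++ [x]) hF
            (by intro a ha; rcases List.mem_append.1 ha with h | h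
                · exact hT a h
                · simp at h; subst h; exact hx)]
          simp [List.filter, hx]

-- stable sort by a Bool key = the false-key elements, then the true-key elements, in order
theorem sorted_bool_key {α : Type} (key : α → Bool) (xs : List α) :
    PySem.List.sorted xs key false = xs.filter (fun c => !(key c)) ++ xs.filter key := by
  rw [PySem.List.sorted_eq_foldl_insertBy]
  have := foldl_insertBy_partition key xs [] [] (by simp) (by simp)
  simpa using this

-- A's fold computes the two filters
theorem foldA_filter (xs u l : List Char) :
    xs.foldl (fun (acc : List Char × List Char) character =>
        if PySem.Chars.isupper character then (acc.1 ++ [character], acc.2)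
        else (acc.1, acc.2 ++ [character])) (u, l)
      = (u ++ xs.filter PySem.Chars.isupper, l ++ xs.filter (fun c => !(PySem.Chars.isupper c))) := by
  induction xs generalizing u l with
  | nil => simp
  | cons x xs ih =>
      cases hx : PySem.Chars.isupper x <;>
        simp [List.foldl_cons, hx, ih, List.filter, List.append_assoc]

-- ===== VERDICT (by name: the statement is the Claim_ definition above) =====
theorem accept_mixed_case_string_and_move_upper_case_to_front_spec : Claim_equal_accept_mixed_case_string_and_move_upper_case_to_front := by
  intro s _
  show _ = _
  unfold accept_mixed_case_string_and_move_upper_case_to_front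
    accept_mixed_case_string_and_move_upper_case_to_front_alt
  rw [sorted_bool_key, foldA_filter]
  simp [Bool.not_not]
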